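-- pv_equiv track=rewrite | github.com/daita-technologies/backend | daita-app/core-service/functions/handlers/thumbnail/divide_batch/app.py | convert_to_image_batches
-- ===== SOURCE A (Python) =====
-- from itertools import chain, islice
--
-- def batcher(iterable, size):
--     iterator = iter(iterable)
--     for first in iterator:
--         yield list(chain([first], islice(iterator, size - 1)))
--
-- def convert_to_image_batches(data):
--     images = []
--     for it in data:
--         if not 'thumbnail' in it or not bool(it['thumbnail']):
--             images.append(it['s3_key'])
--
--     def generator():
--         yield from images
--     return batcher(generator(), 100)
-- ===== SOURCE B (Python) =====
-- def convert_to_image_batches(data):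
--     images = [it['s3_key'] for it in data if not it.get('thumbnail')]
--     return (images[i:i + 100] for i in range(0, len(images), 100))
-- ===== Notes on version B (the rewrite author's own statement) =====
-- stated objective: simpler
-- what changed: Replaces the batcher/inner-generator pair (iterator pulling via chain+islice) and the append loop with one filtering list comprehension plus a generator expression over stepped index slices images[i:i+100].
import Mathlib
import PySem

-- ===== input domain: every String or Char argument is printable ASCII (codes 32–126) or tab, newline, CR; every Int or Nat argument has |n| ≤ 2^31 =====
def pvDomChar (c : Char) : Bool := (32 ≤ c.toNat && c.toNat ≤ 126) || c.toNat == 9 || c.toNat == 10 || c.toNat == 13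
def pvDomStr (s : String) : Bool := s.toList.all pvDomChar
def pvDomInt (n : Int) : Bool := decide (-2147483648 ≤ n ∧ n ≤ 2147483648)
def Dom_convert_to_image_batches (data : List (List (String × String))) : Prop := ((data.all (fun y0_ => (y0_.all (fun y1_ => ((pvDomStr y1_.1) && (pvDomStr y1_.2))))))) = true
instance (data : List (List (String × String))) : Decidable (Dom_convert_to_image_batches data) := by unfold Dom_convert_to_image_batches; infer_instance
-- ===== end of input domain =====

-- B changes decomposition only: one filtering comprehension + stepped index slices instead of
-- A's append loop, inner generator and chain/islice batcher. Both return a one-shot generator of batches.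

-- dict lookup on an association list (first match), shared by both ports
def pvGet? (it : List (String × String)) (k : String) : Option String :=
  (it.find? (fun kv => kv.1 == k)).map (·.2)

-- ===== PORT A =====
-- A's batcher: pull the first element, then islice the next size-1 (size = 100), recurse on the rest
def pvBatcher : List String → List (List String)
  | [] => []
  | x :: rest => (x :: rest.take 99) :: pvBatcher (rest.drop 99)
termination_by xs => xs.length
decreasing_by simp

def convert_to_image_batches (data : List (List (String × String))) : List (List String) :=
  -- images loop: if not 'thumbnail' in it or not bool(it['thumbnail']): images.append(it['s3_key'])
  -- (it['s3_key'] raises KeyError when absent: excluded by Pre_; the port uses getD "" there)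
  let images := data.foldl (fun images it =>
    if (!(pvGet? it "thumbnail").isSome) || (((pvGet? it "thumbnail").getD "") == "") then
      images ++ [(pvGet? it "s3_key").getD ""]
    else images) []
  pvBatcher images

-- ===== PORT B =====
def convert_to_image_batches_alt (data : List (List (String × String))) : List (List String) :=
  -- images = [it['s3_key'] for it in data if not it.get('thumbnail')]
  let images := (data.filter (fun it => ((pvGet? it "thumbnail").getD "") == "")).map
    (fun it => (pvGet? it "s3_key").getD "")
  -- (images[i:i+100] for i in range(0, len(images), 100))
  (PySem.List.pyRange 0 (images.length : Int) 100).map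
    (fun i => PySem.List.slice images (some i) (some (i + 100)))

-- ===== PRECONDITION & SPEC =====
-- Pre_ excludes exactly the inputs on which A raises KeyError: an item selected by the filter
-- (missing or falsy 'thumbnail') that has no 's3_key' key. (B raises there too.)
def Pre_convert_to_image_batches (data : List (List (String × String))) : Prop :=
  ∀ it ∈ data, ((pvGet? it "thumbnail").getD "") = "" → (pvGet? it "s3_key").isSome
instance (data : List (List (String × String))) : Decidable (Pre_convert_to_image_batches data) := by
  unfold Pre_convert_to_image_batches; infer_instance

def pvWitness_convert_to_image_batches : (List (List (String × String))) :=
  [[("s3_key", "a")], [("thumbnail", "t"), ("s3_key", "b")], [("thumbnail", ""), ("s3_key", "c")]]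

def Spec_convert_to_image_batches (data : List (List (String × String))) (out : List (List String)) : Prop := out = convert_to_image_batches_alt data
instance (data : List (List (String × String))) (out : List (List String)) : Decidable (Spec_convert_to_image_batches data out) := by unfold Spec_convert_to_image_batches; infer_instance

-- ===== CLAIM (what is proved, stated in full; the proofs are below) =====
def Claim_equal_convert_to_image_batches : Prop := ∀ (data : List (List (String × String))), Dom_convert_to_image_batches data → Pre_convert_to_image_batches data → Spec_convert_to_image_batches data (convert_to_image_batches data)

-- ===== LEMMAS AND PROOFS =====

-- A's append loop builds exactly B's filter-then-map comprehension
theorem pv_foldl_filter_map (c : List (String × String) → Bool)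
    (g : List (String × String) → String) :
    ∀ (l : List (List (String × String))) (init : List String),
      l.foldl (fun acc it => if c it then acc ++ [g it] else acc) init
        = init ++ (l.filter c).map g := by
  intro l
  induction l with
  | nil => simp
  | cons it rest ih =>
      intro init
      by_cases h : c it = true <;> simp [List.foldl_cons, h, ih]

-- A's filter condition equals B's ('thumbnail' missing ⇒ getD "" = "")
theorem pv_cond_eq (it : List (String × String)) :
    ((!(pvGet? it "thumbnail").isSome) || (((pvGet? it "thumbnail").getD "") == ""))
      = (((pvGet? it "thumbnail").getD "") == "") := by
  cases h : pvGet? it "thumbnail" <;> simp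

theorem pv_pyRange100_cons (a b : Int) (h : a < b) :
    PySem.List.pyRange a b 100 = a :: PySem.List.pyRange (a + 100) b 100 := by
  rw [PySem.List.pyRange_of_pos a b (by norm_num),
      PySem.List.pyRange_of_pos (a + 100) b (by norm_num)]
  have hcount : (if a < b then ((b - a + 100 - 1) / 100).toNat else 0)
      = (if a + 100 < b then ((b - (a + 100) + 100 - 1) / 100).toNat else 0) + 1 := by
    split_ifs <;> omega
  rw [hcount, List.range_succ_eq_map]
  simp only [List.map_cons, List.map_map]
  refine List.cons_eq_cons.mpr ⟨by simp, ?_⟩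
  apply List.map_congr_left
  intro k _
  simp [Function.comp]
  ring

theorem pv_pyRange100_shift (b : Int) :
    PySem.List.pyRange 100 b 100 = (PySem.List.pyRange 0 (b - 100) 100).map (· + 100) := by
  rw [PySem.List.pyRange_of_pos 100 b (by norm_num),
      PySem.List.pyRange_of_pos 0 (b - 100) (by norm_num)]
  have hif : (if (100 : Int) < b then ((b - 100 + 100 - 1) / 100).toNat else 0)
      = (if (0 : Int) < b - 100 then ((b - 100 + 100 - 1) / 100).toNat else 0) := by
    split_ifs <;> omega
  rw [hif, List.map_map, show b - 100 - 0 = b - 100 from by ring]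
  apply List.map_congr_left
  intro k _
  simp [Function.comp]
  ring

theorem pv_slice_shift (xs : List String) (i : Int) (hi : 0 ≤ i) :
    PySem.List.slice xs (some (i + 100)) (some (i + 100 + 100))
      = PySem.List.slice (xs.drop 100) (some i) (some (i + 100)) := by
  rw [PySem.List.slice_toNat xs (by omega) (by omega),
      PySem.List.slice_toNat (xs.drop 100) (by omega) (by omega),
      List.drop_drop]
  have h1 : (i + 100 + 100).toNat - (i + 100).toNat = 100 := by omega
  have h2 : (i + 100).toNat - i.toNat = 100 := by omega
  have h3 : (i + 100).toNat = i.toNat + 100 := by omega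
  rw [h1, h2, h3, Nat.add_comm]

theorem pv_batcher_eq_slices : ∀ (xs : List String),
    pvBatcher xs = (PySem.List.pyRange 0 (xs.length : Int) 100).map
      (fun i => PySem.List.slice xs (some i) (some (i + 100))) := by
  intro xs
  match xs with
  | [] =>
      simp only [List.length_nil, Nat.cast_zero]
      rw [show PySem.List.pyRange 0 0 100 = [] from rfl]
      simp [pvBatcher]
  | x :: rest =>
      have ih := pv_batcher_eq_slices (rest.drop 99)
      have hlen : (0 : Int) < ((x :: rest).length : Int) := by exact_mod_cast Nat.succ_pos rest.length
      rw [pv_pyRange100_cons 0 _ hlen]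
      simp only [List.map_cons, zero_add]
      have hhead : PySem.List.slice (x :: rest) (some 0) (some 100)
          = x :: rest.take 99 := by
        rw [PySem.List.slice_toNat (x :: rest) (by norm_num) (by norm_num)]
        simp
      rw [pvBatcher, hhead, ih]
      congr 1
      rw [pv_pyRange100_shift, List.map_map]
      have hdrop : (x :: rest).drop 100 = rest.drop 99 := by simp
      have hlen2 : ((x :: rest).length : Int) - 100 = ((rest.drop 99).length : Int) ∨
          (((x :: rest).length : Int) - 100 ≤ 0 ∧ ((rest.drop 99).length : Int) = 0) := by
        simp; omega
      have hrange : PySem.List.pyRange 0 (((x :: rest).length : Int) - 100) 100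
          = PySem.List.pyRange 0 ((rest.drop 99).length : Int) 100 := by
        rcases hlen2 with h | ⟨h1, h2⟩
        · rw [h]
        · rw [h2, PySem.List.pyRange_of_pos 0 _ (by norm_num),
              PySem.List.pyRange_of_pos 0 0 (by norm_num)]
          split_ifs <;> simp <;> omega
      rw [hrange]
      apply List.map_congr_left
      intro i hi
      have hi0 : 0 ≤ i := by
        rw [PySem.List.pyRange_of_pos 0 _ (by norm_num)] at hi
        simp at hi
        obtain ⟨k, _, hk⟩ := hi
        omega
      simp only [Function.comp]
      rw [show i + 100 + 100 = i + 100 + 100 from rfl]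
      rw [pv_slice_shift (x :: rest) i hi0, hdrop]
termination_by xs => xs.length
decreasing_by simp

-- ===== VERDICT (by name: the statement is the Claim_ definition above) =====
theorem convert_to_image_batches_spec : Claim_equal_convert_to_image_batches := by
  intro data _ _
  unfold Spec_convert_to_image_batches convert_to_image_batches convert_to_image_batches_alt
  simp only []
  have hcond : (fun images it =>
      if (!(pvGet? it "thumbnail").isSome) || (((pvGet? it "thumbnail").getD "") == "") then
        images ++ [(pvGet? it "s3_key").getD ""]
      else images)
      = (fun (images : List String) it =>
        if (((pvGet? it "thumbnail").getD "") == "") then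
          images ++ [(pvGet? it "s3_key").getD ""]
        else images) := by
    funext images it
    rw [pv_cond_eq]
  rw [hcond,
      pv_foldl_filter_map (fun it => ((pvGet? it "thumbnail").getD "") == "")
        (fun it => (pvGet? it "s3_key").getD "") data [],
      List.nil_append, pv_batcher_eq_slices]
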